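-- pv_equiv track=rewrite | github.com/akschneider1/RAF_Agentic_AI | preprocessing.py | convert_iob_to_iob2
-- ===== SOURCE A (Python) =====
-- from typing import List, Dict, Tuple, Optional, Union
--
-- def convert_iob_to_iob2(labels: List[str]) -> List[str]:
--     """Convert IOB to IOB2 format ensuring proper B- prefixes"""
--     if not labels:
--         return labels
--
--     converted = []
--     prev_label = 'O'
--
--     for label in labels:
--         if label == 'O':
--             converted.append('O')
--             prev_label = 'O'
--         elif label.startswith('I-'):
--             entity_type = label[2:]
--             prev_entity = prev_label[2:] if prev_label.startswith(('B-', 'I-')) else None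
--
--             if prev_entity == entity_type:
--                 # Continue the entity
--                 converted.append(label)
--             else:
--                 # Start new entity (convert I- to B-)
--                 converted.append(f'B-{entity_type}')
--             prev_label = converted[-1]
--         elif label.startswith('B-'):
--             converted.append(label)
--             prev_label = label
--         else:
--             # Handle any other format
--             converted.append(label)
--             prev_label = label
--
--     return converted
-- ===== SOURCE B (Python) =====
-- def _fix_pair(prev, cur):
--     """Stateless IOB2 decision from the adjacent original-label pair."""
--     if cur == 'O' or not cur.startswith('I-'):
--         return cur
--     if (prev.startswith('B-') or prev.startswith('I-')) and prev[2:] == cur[2:]: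
--         return cur
--     return 'B-' + cur[2:]
--
-- def convert_iob_to_iob2(labels):
--     if not labels:
--         return labels
--     prev_labels = ['O'] + labels[:-1]
--     return [_fix_pair(p, c) for p, c in zip(prev_labels, labels)]
-- ===== Notes on version B (the rewrite author's own statement) =====
-- stated objective: alternative
-- what changed: Replaced the stateful loop threading prev_label (the previously emitted, possibly rewritten label) with a stateless per-pair map over each label zipped with the original label preceding it (an O-tag sentinel in front), justified by the invariant that conversion preserves the previous label's entity type.
import Mathlib
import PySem

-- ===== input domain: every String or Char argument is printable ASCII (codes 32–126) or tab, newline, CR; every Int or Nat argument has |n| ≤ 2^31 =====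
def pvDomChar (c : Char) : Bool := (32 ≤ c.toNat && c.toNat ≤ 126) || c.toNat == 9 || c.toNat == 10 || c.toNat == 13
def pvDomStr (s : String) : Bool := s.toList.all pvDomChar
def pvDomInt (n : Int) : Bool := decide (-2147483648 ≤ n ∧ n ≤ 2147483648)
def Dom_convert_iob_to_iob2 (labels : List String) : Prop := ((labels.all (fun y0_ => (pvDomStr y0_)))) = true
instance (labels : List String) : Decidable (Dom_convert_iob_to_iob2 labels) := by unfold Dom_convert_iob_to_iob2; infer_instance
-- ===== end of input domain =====

-- B replaces A's stateful loop (prev_label = last emitted label) with a stateless map over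
-- adjacent ORIGINAL-label pairs; same O(n) cost, different decomposition (objective: alternative).

-- ===== PORT A =====
-- s[2:] (shared primitive wrapper, used by both ports)
def pvDrop2 (s : String) : String := PySem.Str.slice s (some 2) none

-- the for-loop of A, threading prev_label; the accumulated list is the returned list
def pvConvA (prev : String) : List String → List String
  | [] => []
  | label :: rest =>
    if label == "O" then
      "O" :: pvConvA "O" rest
    else if PySem.Str.startswith label "I-" then
      let entityType := pvDrop2 label
      let prevEntity : Option String :=
        if PySem.Str.startswith prev "B-" || PySem.Str.startswith prev "I-" then
          some (pvDrop2 prev) else none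
      if prevEntity = some entityType then
        label :: pvConvA label rest
      else
        ("B-" ++ entityType) :: pvConvA ("B-" ++ entityType) rest
    else if PySem.Str.startswith label "B-" then
      label :: pvConvA label rest
    else
      label :: pvConvA label rest

def convert_iob_to_iob2 (labels : List String) : List String :=
  if labels = [] then labels else pvConvA "O" labels

-- ===== PORT B =====
-- _fix_pair(prev, cur) from Source B
def pvFixPair (prev cur : String) : String :=
  if cur == "O" || !(PySem.Str.startswith cur "I-") then cur
  else if (PySem.Str.startswith prev "B-" || PySem.Str.startswith prev "I-")
          && (pvDrop2 prev == pvDrop2 cur) then cur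
  else "B-" ++ pvDrop2 cur

def convert_iob_to_iob2_alt (labels : List String) : List String :=
  if labels = [] then labels
  else
    -- prev_labels = ['O'] + labels[:-1]; result = [fix(p,c) for p,c in zip(prev_labels, labels)]
    (List.zip ("O" :: PySem.List.slice labels none (some (-1))) labels).map
      (fun pc => pvFixPair pc.1 pc.2)

-- ===== PRECONDITION & SPEC =====
def Spec_convert_iob_to_iob2 (labels : List String) (out : List String) : Prop := out = convert_iob_to_iob2_alt labels
instance (labels : List String) (out : List String) : Decidable (Spec_convert_iob_to_iob2 labels out) := by unfold Spec_convert_iob_to_iob2; infer_instance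

-- ===== CLAIM (what is proved, stated in full; the proofs are below) =====
def Claim_equal_convert_iob_to_iob2 : Prop := ∀ (labels : List String), Dom_convert_iob_to_iob2 labels → Spec_convert_iob_to_iob2 labels (convert_iob_to_iob2 labels)

-- ===== LEMMAS AND PROOFS =====

-- the only feature of prev_label that A's loop body consults
def pvKey (s : String) : Option String :=
  if PySem.Str.startswith s "B-" || PySem.Str.startswith s "I-" then some (pvDrop2 s) else none

theorem pvSw_append (e : String) : PySem.Str.startswith ("B-" ++ e) "B-" = true := by
  simp only [PySem.Str.startswith_eq, String.toList_append]
  rw [PySem.Chars.startswith_iff]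
  exact ⟨e.toList, by simp⟩

theorem pvDrop2_append (e : String) : pvDrop2 ("B-" ++ e) = e := by
  unfold pvDrop2
  have h : (PySem.Str.slice ("B-" ++ e) (some 2) none).toList = e.toList := by
    rw [PySem.Str.toList_slice]
    simp only [PySem.Chars.slice_eq_listSlice]
    rw [PySem.List.slice_from (ha := by norm_num)]
    simp
  exact String.toList_inj.mp h

theorem pvKey_B (e : String) : pvKey ("B-" ++ e) = some e := by
  unfold pvKey
  rw [pvSw_append, Bool.true_or, if_pos rfl, pvDrop2_append]

theorem pvCond_iff (p c : String) :
    ((PySem.Str.startswith p "B-" || PySem.Str.startswith p "I-")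
      && (pvDrop2 p == pvDrop2 c)) = true ↔ pvKey p = some (pvDrop2 c) := by
  unfold pvKey
  cases h : (PySem.Str.startswith p "B-" || PySem.Str.startswith p "I-") with
  | false => simp
  | true =>
    rw [Bool.true_and, if_pos rfl]
    simp only [beq_iff_eq, Option.some.injEq]

theorem pvConv_eq (l : List String) : ∀ (pA pO : String), pvKey pA = pvKey pO →
    pvConvA pA l = (List.zip (pO :: l.dropLast) l).map (fun pc => pvFixPair pc.1 pc.2) := by
  induction l with
  | nil => intro pA pO _; rfl
  | cons c r ih =>
    intro pA pO hkey
    have hzip : List.zip (pO :: (c :: r).dropLast) (c :: r)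
        = (pO, c) :: List.zip (c :: r.dropLast) r := by
      cases r <;> rfl
    rw [hzip, List.map_cons]
    unfold pvConvA
    by_cases hO : c = "O"
    · subst hO
      have hhead : pvFixPair pO "O" = "O" := by
        unfold pvFixPair
        rw [if_pos (by decide : ((("O":String) == "O") || !(PySem.Str.startswith "O" "I-")) = true)]
      rw [hhead, if_pos (by decide : ((("O":String) == "O")) = true), ih "O" "O" rfl]
    · have hc : (c == "O") = false := by simp [hO]
      rw [hc, if_neg (by decide : ¬ (false = true))]
      by_cases hI : PySem.Str.startswith c "I-" = true
      · have hkc : pvKey c = some (pvDrop2 c) := by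
          unfold pvKey
          rw [hI, Bool.or_true, if_pos rfl]
        rw [hI, if_pos rfl]
        rw [show (if PySem.Str.startswith pA "B-" || PySem.Str.startswith pA "I-" then
              some (pvDrop2 pA) else none) = pvKey pA from rfl, hkey]
        by_cases hk : pvKey pO = some (pvDrop2 c)
        · have hhead : pvFixPair pO c = c := by
            unfold pvFixPair
            rw [hc, hI, if_neg (by decide : ¬ ((false || !true) = true)),
              if_pos ((pvCond_iff pO c).mpr hk)]
          rw [if_pos hk, hhead, ih c c rfl]
        · have hB : ((PySem.Str.startswith pO "B-" || PySem.Str.startswith pO "I-")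
              && (pvDrop2 pO == pvDrop2 c)) = false := by
            rw [← Bool.not_eq_true, pvCond_iff]
            exact hk
          have hhead : pvFixPair pO c = "B-" ++ pvDrop2 c := by
            unfold pvFixPair
            rw [hc, hI, if_neg (by decide : ¬ ((false || !true) = true)), hB,
              if_neg (by decide : ¬ (false = true))]
          rw [if_neg hk, hhead, ih ("B-" ++ pvDrop2 c) c ((pvKey_B (pvDrop2 c)).trans hkc.symm)]
      · have hswf : PySem.Str.startswith c "I-" = false := by
          rw [← Bool.not_eq_true]; exact hI
        have hhead : pvFixPair pO c = c := by
          unfold pvFixPair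
          rw [hc, hswf, if_pos (by decide : ((false || !false) = true))]
        rw [hswf, if_neg (by decide : ¬ (false = true)), hhead, ih c c rfl]
        split <;> rfl

-- ===== VERDICT (by name: the statement is the Claim_ definition above) =====
theorem convert_iob_to_iob2_spec : Claim_equal_convert_iob_to_iob2 := by
  intro labels _
  unfold Spec_convert_iob_to_iob2 convert_iob_to_iob2 convert_iob_to_iob2_alt
  by_cases h : labels = []
  · simp [h]
  · simp only [h, PySem.List.slice_to_neg_one]
    exact pvConv_eq labels "O" "O" rfl
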